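-- pv_equiv track=rewrite | github.com/mrinal413/Cryptopals | Challenge Set 2/Implement CBC Mode/cbc-mode.py | pkcs7_padding
-- ===== SOURCE A (Python) =====
-- def pkcs7_padding(s, p):
--     b = p-(len(s))
--     nstr=""
--     for i in range(p):
--         if i < len(s):
--             nstr = nstr+s[i]
--         else:
--             nstr = nstr + chr(92) +'x' + str(b).zfill(2)
--     return nstr
-- ===== SOURCE B (Python) =====
-- def pkcs7_padding(s, p):
--     b = p - len(s)
--     token = chr(92) + 'x' + str(b).zfill(2)
--     return s[:max(0, p)] + token * max(0, b)
-- ===== Notes on version B (the rewrite author's own statement) =====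
-- stated objective: simpler
-- what changed: Replaces the per-index loop with quadratic string concatenation by a closed form: slice s[:max(0,p)] plus the padding token repeated max(0, p - len(s)) times.
import Mathlib
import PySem

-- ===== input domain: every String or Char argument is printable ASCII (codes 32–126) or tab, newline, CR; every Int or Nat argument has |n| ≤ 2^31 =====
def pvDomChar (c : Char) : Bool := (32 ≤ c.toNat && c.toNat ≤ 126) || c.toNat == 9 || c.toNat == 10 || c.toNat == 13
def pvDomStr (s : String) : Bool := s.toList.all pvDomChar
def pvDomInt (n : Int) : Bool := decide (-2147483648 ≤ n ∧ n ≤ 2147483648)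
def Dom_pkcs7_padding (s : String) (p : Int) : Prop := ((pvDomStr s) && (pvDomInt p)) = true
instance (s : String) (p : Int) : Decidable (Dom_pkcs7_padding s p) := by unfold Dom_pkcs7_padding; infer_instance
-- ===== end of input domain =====

-- B replaces A's per-index loop by a closed-form 'prefix slice ++ token repeated' expression (objective: simpler).

-- ===== PORT A =====
-- literal transliteration: b = p - len(s); for i in range(p): append s[i] or chr(92)+'x'+str(b).zfill(2)
def pkcs7_padding (s : String) (p : Int) : String :=
  let cs := s.toList
  let b : Int := p - (cs.length : Int)
  let nstr := (PySem.List.pyRange 0 p 1).foldl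
    (fun nstr i =>
      if i < (cs.length : Int) then
        nstr ++ (PySem.List.pyGet? cs i).toList   -- s[i]; in range here, so never the IndexError case
      else
        nstr ++ [Char.ofNat 92] ++ ['x'] ++ PySem.Chars.zfill (PySem.Int.toChars b) 2) []
  String.mk nstr

-- ===== PORT B =====
-- literal transliteration of Source B: token = chr(92)+'x'+str(b).zfill(2); s[:max(0,p)] + token * max(0,b)
def pkcs7_padding_alt (s : String) (p : Int) : String :=
  let cs := s.toList
  let b : Int := p - (cs.length : Int)
  let token := Char.ofNat 92 :: 'x' :: PySem.Chars.zfill (PySem.Int.toChars b) 2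
  String.mk (PySem.List.slice cs none (some (max 0 p)) ++ (List.replicate (max 0 b).toNat token).flatten)

-- ===== PRECONDITION & SPEC =====
def Spec_pkcs7_padding (s : String) (p : Int) (out : String) : Prop := out = pkcs7_padding_alt s p
instance (s : String) (p : Int) (out : String) : Decidable (Spec_pkcs7_padding s p out) := by unfold Spec_pkcs7_padding; infer_instance

-- ===== CLAIM (what is proved, stated in full; the proofs are below) =====
def Claim_equal_pkcs7_padding : Prop := ∀ (s : String) (p : Int), Dom_pkcs7_padding s p → Spec_pkcs7_padding s p (pkcs7_padding s p)

-- ===== LEMMAS AND PROOFS =====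

-- the loop body, flat-mapped over range n, is 'take n ++ (n - len) copies of tok'
theorem pv_flatMap_pad (cs tok : List Char) (n : Nat) :
    (List.range n).flatMap (fun k => if k < cs.length then cs[k]?.toList else tok)
    = cs.take n ++ (List.replicate (n - cs.length) tok).flatten := by
  induction n with
  | zero => simp
  | succ n ih =>
    rw [List.range_succ, List.flatMap_append, ih]
    by_cases h : n < cs.length
    · have h1 : n + 1 - cs.length = 0 := by omega
      have h2 : n - cs.length = 0 := by omega
      simp only [List.flatMap_cons, List.flatMap_nil, List.append_nil, h1, h2,
        List.replicate_zero, List.flatten_nil, List.take_add_one]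
      simp [h]
    · have h1 : n + 1 - cs.length = (n - cs.length) + 1 := by omega
      have ht : cs.take n = cs := List.take_of_length_le (by omega)
      have ht1 : cs.take (n + 1) = cs := List.take_of_length_le (by omega)
      simp only [List.flatMap_cons, List.flatMap_nil, List.append_nil, h1,
        List.replicate_succ', List.flatten_append, ht, ht1]
      simp [h]

theorem pkcs7_padding_eq (s : String) (p : Int) :
    pkcs7_padding s p = pkcs7_padding_alt s p := by
  unfold pkcs7_padding pkcs7_padding_alt
  apply congrArg String.mk
  have hbody : (fun (nstr : List Char) (i : Int) =>
      if i < (s.toList.length : Int) then nstr ++ (PySem.List.pyGet? s.toList i).toList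
      else nstr ++ [Char.ofNat 92] ++ ['x']
        ++ PySem.Chars.zfill (PySem.Int.toChars (p - (s.toList.length : Int))) 2)
    = (fun (nstr : List Char) (i : Int) => nstr ++
      (if i < (s.toList.length : Int) then (PySem.List.pyGet? s.toList i).toList
       else [Char.ofNat 92] ++ ['x']
        ++ PySem.Chars.zfill (PySem.Int.toChars (p - (s.toList.length : Int))) 2)) := by
    funext nstr i
    split <;> simp
  rw [hbody, PySem.List.foldl_append_eq_flatMap, PySem.List.pyRange_one, List.flatMap_map]
  simp only [List.nil_append, zero_add, PySem.List.pyGet?_natCast, Nat.cast_lt]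
  rw [pv_flatMap_pad, PySem.List.slice_to _ (by omega : (0:Int) ≤ max 0 p)]
  have e1 : (p - 0).toNat = (max 0 p).toNat := by omega
  have e2 : (max 0 p).toNat - s.toList.length = (max 0 (p - (s.toList.length : Int))).toNat := by omega
  rw [e1, e2]
  simp

-- ===== VERDICT (by name: the statement is the Claim_ definition above) =====
theorem pkcs7_padding_spec : Claim_equal_pkcs7_padding := by
  intro s p _
  exact pkcs7_padding_eq s p
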